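-- pv_equiv track=rewrite | github.com/Linzertorte/SRM | 258Div1/CompressionText.py | shortestLength
-- ===== SOURCE A (Python) =====
-- def shortestLength(original):
--     def nextKey(s):
--         n = len(s)
--         i = 0
--         while i+3<=n:
--             yield s[i:i+3]
--             i+=1
--
--     n = len(original)
--     best = n
--     for key1 in nextKey(original):
--         for key2 in nextKey(original):
--             s = list(original)
--             i = 0
--             m = n
--             while i+3<=n:
--                 if (s[i:i+3])==list(key1) or s[i:i+3]==list(key2):
--
--                     m -= 1
--                     i+=3
--                 else:
--                     i+=1
--             #print key1,key2
--             best = min(best,m)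
--     return best
-- ===== SOURCE B (Python) =====
-- def shortestLength(original):
--     n = len(original)
--     pos = {}
--     for i in range(n - 2):
--         pos.setdefault(original[i:i+3], []).append(i)
--
--     def merge(xs, ys):
--         out = []
--         a = b = 0
--         while a < len(xs) and b < len(ys):
--             if xs[a] <= ys[b]:
--                 out.append(xs[a]); a += 1
--             else:
--                 out.append(ys[b]); b += 1
--         out.extend(xs[a:])
--         out.extend(ys[b:])
--         return out
--
--     best = n
--     ks = list(pos)
--     while ks:
--         ka = ks[0]
--         for kb in ks:
--             occ = pos[ka] if kb == ka else merge(pos[ka], pos[kb])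
--             cnt = 0
--             nxt = 0
--             for p in occ:
--                 if p >= nxt:
--                     cnt += 1
--                     nxt = p + 3
--             best = min(best, n - cnt)
--         ks = ks[1:]
--     return best
-- ===== Notes on version B (the rewrite author's own statement) =====
-- stated objective: faster
-- what changed: Instead of scanning the whole string for every ordered pair of (possibly duplicate) 3-gram keys (O(n^3)), B indexes positions by distinct 3-gram once, and for each unordered pair of distinct keys merges the two sorted occurrence lists and greedily counts non-overlapping matches, so each pair costs only the size of its occurrence lists (O(n^2) total).
import Mathlib
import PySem

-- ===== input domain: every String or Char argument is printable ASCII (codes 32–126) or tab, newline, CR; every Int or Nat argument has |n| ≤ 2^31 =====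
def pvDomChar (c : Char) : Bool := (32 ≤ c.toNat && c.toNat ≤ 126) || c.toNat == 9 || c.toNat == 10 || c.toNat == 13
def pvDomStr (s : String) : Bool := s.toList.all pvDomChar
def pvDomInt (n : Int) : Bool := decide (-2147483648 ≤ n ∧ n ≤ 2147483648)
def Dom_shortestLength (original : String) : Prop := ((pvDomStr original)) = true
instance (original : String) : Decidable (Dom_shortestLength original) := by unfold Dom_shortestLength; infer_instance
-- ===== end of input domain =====

-- B replaces A's full rescan of the string for every ordered pair of 3-gram keys by a
-- positions-by-distinct-3-gram index, merging two sorted occurrence lists per unordered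
-- key pair and greedily counting non-overlapping matches (asymptotically faster).

-- ===== PORT A =====

-- the generator nextKey: yields original[i:i+3] while i+3 <= n
def pvNextKey (s : String) (i : Nat) : List String :=
  if _h : i + 3 ≤ s.toList.length then
    PySem.Str.slice s (some (i : Int)) (some ((i : Int) + 3)) :: pvNextKey s (i + 1)
  else []
termination_by s.toList.length - i
decreasing_by simp only [String.length_toList] at *; omega

-- A's inner while loop: s = list(original), compares s[i:i+3] with list(key1)/list(key2)
def pvScanA (cs : List Char) (k1 k2 : List Char) (i : Nat) (m : Int) : Int :=
  if _h : i + 3 ≤ cs.length then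
    if PySem.List.slice cs (some (i : Int)) (some ((i : Int) + 3)) = k1 ∨
       PySem.List.slice cs (some (i : Int)) (some ((i : Int) + 3)) = k2 then
      pvScanA cs k1 k2 (i + 3) (m - 1)
    else
      pvScanA cs k1 k2 (i + 1) m
  else m
termination_by cs.length - i

def shortestLength (original : String) : Int :=
  let n := original.toList.length
  (pvNextKey original 0).foldl (fun best k1 =>
    (pvNextKey original 0).foldl (fun best k2 =>
      min best (pvScanA original.toList k1.toList k2.toList 0 (n : Int))) best) (n : Int)

-- ===== PORT B =====

-- original[i:i+3]
def pvGramB (s : String) (i : Nat) : String :=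
  PySem.Str.slice s (some (i : Int)) (some ((i : Int) + 3))

-- pos = {}; for i in range(n-2): pos.setdefault(original[i:i+3], []).append(i)
def pvPos (s : String) : PySem.Dict String (List Nat) :=
  (List.range (s.toList.length - 2)).foldl
    (fun d i => d.modify (pvGramB s i) [] (fun v => v ++ [i])) PySem.Dict.empty

-- two-pointer merge of two sorted occurrence lists
def pvMerge : List Nat → List Nat → List Nat
  | [], ys => ys
  | x :: xs, [] => x :: xs
  | x :: xs, y :: ys =>
      if x ≤ y then x :: pvMerge xs (y :: ys) else y :: pvMerge (x :: xs) ys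

-- cnt = 0; nxt = 0; for p in occ: if p >= nxt: cnt += 1; nxt = p + 3
def pvCount (occ : List Nat) : Nat :=
  (occ.foldl (fun (st : Nat × Nat) p => if st.2 ≤ p then (st.1 + 1, p + 3) else st)
    ((0 : Nat), (0 : Nat))).1

-- while ks: ka = ks[0]; for kb in ks: …; ks = ks[1:]
def pvPairLoop (n : Nat) (pos : PySem.Dict String (List Nat)) :
    List String → Int → Int
  | [], best => best
  | ka :: rest, best =>
      pvPairLoop n pos rest
        ((ka :: rest).foldl (fun b kb =>
          min b ((n : Int) - (pvCount (if kb = ka then pos.getD ka []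
            else pvMerge (pos.getD ka []) (pos.getD kb [])) : Nat))) best)

def shortestLength_alt (original : String) : Int :=
  let n := original.toList.length
  let pos := pvPos original
  pvPairLoop n pos pos.keys (n : Int)

-- ===== PRECONDITION & SPEC =====
def Spec_shortestLength (original : String) (out : Int) : Prop := out = shortestLength_alt original
instance (original : String) (out : Int) : Decidable (Spec_shortestLength original out) := by unfold Spec_shortestLength; infer_instance

-- ===== CLAIM (what is proved, stated in full; the proofs are below) =====
def Claim_equal_shortestLength : Prop := ∀ (original : String), Dom_shortestLength original → Spec_shortestLength original (shortestLength original)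

-- ===== LEMMAS AND PROOFS =====

-- reference greedy count, as a recursion on the start position, parametrised by the
-- Bool match predicate at each position
def pvScanC (cs : List Char) (f : Nat → Bool) (t : Nat) : Nat :=
  if _h : t + 3 ≤ cs.length then
    if f t then pvScanC cs f (t + 3) + 1 else pvScanC cs f (t + 1)
  else 0
termination_by cs.length - t

-- reference greedy pick on a position list
def pvPick : Nat → List Nat → Nat
  | _, [] => 0
  | t, p :: rest => if p < t then pvPick t rest else pvPick (p + 3) rest + 1

-- the match predicate of A's inner scan for keys k1, k2
def pvF (cs : List Char) (k1 k2 : List Char) (i : Nat) : Bool :=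
  decide (PySem.List.slice cs (some (i : Int)) (some ((i : Int) + 3)) = k1 ∨
          PySem.List.slice cs (some (i : Int)) (some ((i : Int) + 3)) = k2)

-- ---- pvPick lemmas ----

theorem pvPick_none (L : List Nat) (t : Nat) (h : ∀ p ∈ L, p < t) : pvPick t L = 0 := by
  induction L with
  | nil => rfl
  | cons p rest ih =>
      simp only [pvPick, if_pos (h p (by simp))]
      exact ih (fun q hq => h q (by simp [hq]))

theorem pvPick_congr (L : List Nat) (t t' : Nat) (h : ∀ p ∈ L, (p < t ↔ p < t')) :
    pvPick t L = pvPick t' L := by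
  induction L with
  | nil => rfl
  | cons p rest ih =>
      simp only [pvPick]
      by_cases hp : p < t
      · rw [if_pos hp, if_pos ((h p (by simp)).mp hp)]
        exact ih (fun q hq => h q (by simp [hq]))
      · rw [if_neg hp, if_neg (fun hc => hp ((h p (by simp)).mpr hc))]

theorem pvPick_filter_ge' (L : List Nat) (f : Nat → Bool) (t : Nat) :
    ∀ s, t ≤ s → pvPick s (L.filter f) = pvPick s (L.filter (fun p => f p && decide (t ≤ p))) := by
  induction L with
  | nil => intro s _; rfl
  | cons p rest ih =>
      intro s hs
      by_cases hf : f p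
      · by_cases ht : t ≤ p
        · simp only [List.filter_cons, hf, ht, decide_true, Bool.and_self, if_pos, pvPick]
          by_cases hps : p < s
          · rw [if_pos hps, if_pos hps]; exact ih s hs
          · rw [if_neg hps, if_neg hps, ih (p + 3) (by omega)]
        · have hlt : p < t := by omega
          simp only [List.filter_cons, hf, ht, decide_false, Bool.and_false, Bool.false_eq_true,
            if_pos, if_false, pvPick]
          rw [if_pos (by omega : p < s)]
          exact ih s hs
      · simp only [List.filter_cons, hf, Bool.false_and, Bool.false_eq_true, if_false]
        exact ih s hs

theorem pvPick_filter_ge (L : List Nat) (f : Nat → Bool) (t : Nat) :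
    pvPick t (L.filter f) = pvPick t (L.filter (fun p => f p && decide (t ≤ p))) :=
  pvPick_filter_ge' L f t t le_rfl

-- filter with a predicate that forces ≥ s, over range' a b, equals the same filter over the tail from s
theorem pv_filter_range'_ge (a b s : Nat) (g : Nat → Bool) (hg : ∀ p, g p = true → s ≤ p)
    (ha : a ≤ s) (hb : s ≤ a + b) :
    (List.range' a b).filter g = (List.range' s (a + b - s)).filter g := by
  have hsplit : List.range' a (s - a) ++ List.range' (a + (s - a)) (a + b - s) = List.range' a b := by
    rw [List.range'_append_1, show s - a + (a + b - s) = b from by omega]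
  have hnil : (List.range' a (s - a)).filter g = [] := by
    rw [List.filter_eq_nil_iff]
    intro p hp hgp
    have := List.mem_range'_1.mp hp
    have := hg p hgp
    omega
  calc (List.range' a b).filter g
      = (List.range' a (s - a) ++ List.range' (a + (s - a)) (a + b - s)).filter g := by
        rw [hsplit]
    _ = (List.range' (a + (s - a)) (a + b - s)).filter g := by
        rw [List.filter_append, hnil, List.nil_append]
    _ = (List.range' s (a + b - s)).filter g := by
        rw [show a + (s - a) = s from by omega]

-- ---- the central lemma: greedy pick over the filtered position range = A's greedy scan count ----

theorem pvPick_eq_scanC (cs : List Char) (f : Nat → Bool) :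
    ∀ k t, cs.length + 1 ≤ t + k →
      pvPick t ((List.range (cs.length - 2)).filter f) = pvScanC cs f t := by
  intro k
  induction k using Nat.strong_induction_on with
  | _ k ih =>
    intro t hk
    by_cases h3 : t + 3 ≤ cs.length
    · -- step case
      have hk4 : 4 ≤ k := by omega
      rw [pvScanC]
      rw [dif_pos h3]
      set n := cs.length with hn
      set m := n - 2 with hm
      have htm : t < m := by omega
      have hmain : pvPick t ((List.range m).filter f)
          = pvPick t ((List.range' t (m - t)).filter (fun p => f p && decide (t ≤ p))) := by
        rw [pvPick_filter_ge, List.range_eq_range']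
        rw [pv_filter_range'_ge 0 m t _ (fun p hp => by
          simp only [Bool.and_eq_true, decide_eq_true_eq] at hp
          exact hp.2) (by omega) (by omega)]
        simp
      by_cases hf : f t
      · -- match at t
        rw [if_pos hf, hmain]
        rw [show m - t = (m - t - 1) + 1 from by omega, List.range'_succ]
        rw [List.filter_cons, if_pos (by simp [hf])]
        have hhead : pvPick t (t :: (List.range' (t+1) (m-t-1)).filter (fun p => f p && decide (t ≤ p)))
            = pvPick (t+3) ((List.range' (t+1) (m-t-1)).filter (fun p => f p && decide (t ≤ p))) + 1 := by
          simp [pvPick]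
        rw [hhead]
        congr 1
        have step1 : pvPick (t+3) ((List.range' (t+1) (m-t-1)).filter (fun p => f p && decide (t ≤ p)))
            = pvPick (t+3) ((List.range' (t+1) (m-t-1)).filter (fun p => f p && decide (t + 3 ≤ p))) := by
          rw [pvPick_filter_ge]
          congr 1
          apply List.filter_congr
          intro x _
          by_cases hx : t + 3 ≤ x
          · simp [hx, show t ≤ x from by omega]
          · simp [hx]
        have step2 : pvPick (t+3) ((List.range m).filter f)
            = pvPick (t+3) ((List.range' (t+1) (m-t-1)).filter (fun p => f p && decide (t + 3 ≤ p))) := by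
          rw [pvPick_filter_ge, List.range_eq_range']
          by_cases hcase : t + 3 ≤ m
          · rw [pv_filter_range'_ge 0 m (t+1) _ (fun p hp => by
              simp only [Bool.and_eq_true, decide_eq_true_eq] at hp
              omega) (by omega) (by omega)]
            simp [Nat.sub_sub]
          · rw [pvPick_none _ _ (fun p hp => by
              have h1 := List.mem_filter.mp hp
              have h2 := List.mem_range'_1.mp h1.1
              simp only [Bool.and_eq_true, decide_eq_true_eq] at h1
              omega),
              pvPick_none _ _ (fun p hp => by
              have h1 := List.mem_filter.mp hp
              have h2 := List.mem_range'_1.mp h1.1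
              omega)]
        rw [step1, ← step2]
        exact ih (k - 3) (by omega) (t + 3) (by omega)
      · -- no match at t
        rw [if_neg (by simp [hf]), hmain]
        have hcongr : (List.range' t (m - t)).filter (fun p => f p && decide (t ≤ p))
            = (List.range' t (m - t)).filter (fun p => f p && decide (t + 1 ≤ p)) := by
          apply List.filter_congr
          intro x _
          by_cases hx : x = t
          · subst hx; simp [hf]
          · by_cases hx2 : t ≤ x
            · simp [hx2, show t + 1 ≤ x from by omega]
            · simp [hx2, show ¬ (t + 1 ≤ x) from by omega]
        rw [hcongr]
        rw [pvPick_congr _ t (t+1) (fun p hp => by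
          have h4 := (List.mem_filter.mp hp).2
          simp only [Bool.and_eq_true, decide_eq_true_eq] at h4
          omega)]
        have back : pvPick (t+1) ((List.range' t (m - t)).filter (fun p => f p && decide (t + 1 ≤ p)))
            = pvPick (t+1) ((List.range m).filter f) := by
          rw [pvPick_filter_ge _ f (t+1), List.range_eq_range']
          rw [pv_filter_range'_ge 0 m t _ (fun p hp => by
            simp only [Bool.and_eq_true, decide_eq_true_eq] at hp
            omega) (by omega) (by omega)]
          simp
        rw [back]
        exact ih (k - 1) (by omega) (t + 1) (by omega)
    · -- base case: no further window fits
      rw [pvScanC, dif_neg h3]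
      apply pvPick_none
      intro p hp
      have h1 := List.mem_filter.mp hp
      have h2 := List.mem_range.mp h1.1
      omega

-- ---- merge of disjoint sorted filters ----

theorem pvMerge_nil_right (A : List Nat) : pvMerge A [] = A := by
  cases A <;> simp [pvMerge]

theorem pvMerge_cons_left (A B : List Nat) (x : Nat) (h : ∀ y ∈ B, x ≤ y) :
    pvMerge (x :: A) B = x :: pvMerge A B := by
  cases B with
  | nil => rw [pvMerge_nil_right, pvMerge_nil_right]
  | cons b bs => simp only [pvMerge, if_pos (h b (by simp))]

theorem pvMerge_cons_right (A B : List Nat) (x : Nat) (h : ∀ y ∈ A, x < y) :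
    pvMerge A (x :: B) = x :: pvMerge A B := by
  cases A with
  | nil => simp [pvMerge]
  | cons a as =>
      have hx : x < a := h a (by simp)
      simp only [pvMerge]
      rw [if_neg (by omega)]

theorem pvMerge_filter (p q : Nat → Bool) (hdisj : ∀ x, ¬(p x = true ∧ q x = true)) :
    ∀ l : List Nat, l.Pairwise (· < ·) →
      pvMerge (l.filter p) (l.filter q) = l.filter (fun x => p x || q x) := by
  intro l hl
  induction l with
  | nil => simp [pvMerge]
  | cons x rest ih =>
      have hrest := (List.pairwise_cons.mp hl).2
      have hx := (List.pairwise_cons.mp hl).1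
      by_cases hp : p x
      · have hq : ¬ q x = true := fun hq => hdisj x ⟨hp, hq⟩
        simp only [List.filter_cons, hp, hq, Bool.false_eq_true, if_true, if_false, Bool.true_or]
        rw [pvMerge_cons_left _ _ x (fun y hy => le_of_lt (hx y (List.mem_of_mem_filter hy)))]
        rw [ih hrest]
      · by_cases hq : q x
        · simp only [List.filter_cons, hp, hq, Bool.false_eq_true, if_true, if_false, Bool.or_true]
          rw [pvMerge_cons_right _ _ x (fun y hy => hx y (List.mem_of_mem_filter hy))]
          rw [ih hrest]
        · simp only [List.filter_cons, hp, hq, Bool.false_eq_true, if_false, Bool.false_or]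
          exact ih hrest

-- ---- scanA = m - scanC ----

theorem pvScanA_eq (cs : List Char) (k1 k2 : List Char) :
    ∀ t m, pvScanA cs k1 k2 t m = m - (pvScanC cs (pvF cs k1 k2) t : Int) := by
  intro t m
  fun_induction pvScanA cs k1 k2 t m with
  | case1 t m h hc ih =>
      rw [pvScanC, dif_pos h, if_pos (by simpa [pvF] using hc), ih]
      push_cast
      omega
  | case2 t m h hc ih =>
      rw [pvScanC, dif_pos h, if_neg (by simpa [pvF] using hc), ih]
  | case3 t m h =>
      rw [pvScanC, dif_neg h]
      simp

-- ---- counting via foldl = pvPick ----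

theorem pvCount_foldl (L : List Nat) :
    ∀ c t, (L.foldl (fun (st : Nat × Nat) p => if st.2 ≤ p then (st.1 + 1, p + 3) else st) (c, t)).1
      = c + pvPick t L := by
  induction L with
  | nil => intro c t; simp [pvPick]
  | cons p rest ih =>
      intro c t
      by_cases h : t ≤ p
      · simp only [List.foldl_cons, if_pos h, ih, pvPick, if_neg (by omega : ¬ p < t)]
        omega
      · simp only [List.foldl_cons, if_neg h, ih, pvPick, if_pos (by omega : p < t)]

theorem pvCount_eq_pick (L : List Nat) : pvCount L = pvPick 0 L := by
  rw [pvCount, pvCount_foldl]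
  omega

-- ---- fold-min machinery ----

theorem pv_foldl_min_le_init (b : Int) (L : List Int) : L.foldl min b ≤ b := by
  induction L generalizing b with
  | nil => simp
  | cons x rest ih =>
      simp only [List.foldl_cons]
      exact le_trans (ih (min b x)) (min_le_left _ _)

theorem pv_foldl_min_le_mem (L : List Int) (x : Int) : ∀ b, x ∈ L → L.foldl min b ≤ x := by
  induction L with
  | nil => intro b h; simp at h
  | cons y rest ih =>
      intro b h
      simp only [List.foldl_cons]
      rcases List.mem_cons.mp h with rfl | h
      · exact le_trans (pv_foldl_min_le_init _ _) (min_le_right _ _)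
      · exact ih (min b y) h

theorem pv_le_foldl_min (b c : Int) (L : List Int) (hb : c ≤ b) (h : ∀ x ∈ L, c ≤ x) :
    c ≤ L.foldl min b := by
  induction L generalizing b with
  | nil => simpa
  | cons x rest ih =>
      simp only [List.foldl_cons]
      exact ih (min b x) (le_min hb (h x (by simp))) (fun y hy => h y (by simp [hy]))

theorem pv_foldl_min_eq (b : Int) (L1 L2 : List Int)
    (h1 : ∀ x ∈ L1, ∃ y ∈ L2, y ≤ x) (h2 : ∀ y ∈ L2, ∃ x ∈ L1, x ≤ y) :
    L1.foldl min b = L2.foldl min b := by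
  apply le_antisymm
  · apply pv_le_foldl_min _ _ _ (pv_foldl_min_le_init _ _)
    intro y hy
    obtain ⟨x, hx, hxy⟩ := h2 y hy
    exact le_trans (pv_foldl_min_le_mem _ _ _ hx) hxy
  · apply pv_le_foldl_min _ _ _ (pv_foldl_min_le_init _ _)
    intro x hx
    obtain ⟨y, hy, hyx⟩ := h1 x hx
    exact le_trans (pv_foldl_min_le_mem _ _ _ hy) hyx

-- ---- flattening the two pair loops into fold-min over value lists ----

theorem pv_nested_foldl (L1 L2 : List String) (V : String → String → Int) (b : Int) :
    L1.foldl (fun best k1 => L2.foldl (fun best k2 => min best (V k1 k2)) best) b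
      = (L1.flatMap (fun k1 => L2.map (V k1))).foldl min b := by
  induction L1 generalizing b with
  | nil => rfl
  | cons k1 rest ih =>
      simp only [List.foldl_cons, List.flatMap_cons, List.foldl_append, ih, List.foldl_map]

-- B's per-pair value
def pvW (n : Nat) (pos : PySem.Dict String (List Nat)) (ka kb : String) : Int :=
  (n : Int) - (pvCount (if kb = ka then pos.getD ka []
    else pvMerge (pos.getD ka []) (pos.getD kb [])) : Nat)

-- B's value list over the suffix pair loop
def pvVals (n : Nat) (pos : PySem.Dict String (List Nat)) : List String → List Int
  | [] => []
  | ka :: rest => (ka :: rest).map (pvW n pos ka) ++ pvVals n pos rest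

theorem pvPairLoop_eq (n : Nat) (pos : PySem.Dict String (List Nat)) :
    ∀ ks b, pvPairLoop n pos ks b = (pvVals n pos ks).foldl min b := by
  intro ks
  induction ks with
  | nil => intro b; rfl
  | cons ka rest ih =>
      intro b
      simp only [pvPairLoop, pvVals, List.foldl_append, ih, List.foldl_map, pvW]

theorem mem_pvVals (n : Nat) (pos : PySem.Dict String (List Nat)) :
    ∀ ks v, v ∈ pvVals n pos ks → ∃ a ∈ ks, ∃ b ∈ ks, v = pvW n pos a b := by
  intro ks
  induction ks with
  | nil => intro v hv; simp [pvVals] at hv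
  | cons ka rest ih =>
      intro v hv
      rcases List.mem_append.mp hv with hv | hv
      · obtain ⟨b, hb, rfl⟩ := List.mem_map.mp hv
        exact ⟨ka, by simp, b, hb, rfl⟩
      · obtain ⟨a, ha, b, hb, rfl⟩ := ih v hv
        exact ⟨a, by simp [ha], b, by simp [hb], rfl⟩

theorem pvVals_cover (n : Nat) (pos : PySem.Dict String (List Nat)) :
    ∀ ks (a b : String), a ∈ ks → b ∈ ks →
      pvW n pos a b ∈ pvVals n pos ks ∨ pvW n pos b a ∈ pvVals n pos ks := by
  intro ks
  induction ks with
  | nil => intro a b ha; simp at ha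
  | cons k rest ih =>
      intro a b ha hb
      by_cases hak : a = k
      · subst hak
        exact Or.inl (List.mem_append.mpr (Or.inl (List.mem_map.mpr ⟨b, hb, rfl⟩)))
      · by_cases hbk : b = k
        · subst hbk
          exact Or.inr (List.mem_append.mpr (Or.inl (List.mem_map.mpr ⟨a, ha, rfl⟩)))
        · have ha' : a ∈ rest := (List.mem_cons.mp ha).resolve_left hak
          have hb' : b ∈ rest := (List.mem_cons.mp hb).resolve_left hbk
          rcases ih a b ha' hb' with h | h
          · exact Or.inl (List.mem_append.mpr (Or.inr h))
          · exact Or.inr (List.mem_append.mpr (Or.inr h))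

-- ---- membership in the two key collections ----

theorem mem_pvNextKey (s : String) (k : String) :
    ∀ i, k ∈ pvNextKey s i ↔ ∃ j, i ≤ j ∧ j + 3 ≤ s.toList.length ∧ k = pvGramB s j := by
  intro i
  fun_induction pvNextKey s i with
  | case1 i h ih =>
      rw [List.mem_cons, ih]
      constructor
      · rintro (rfl | ⟨j, hij, hj, rfl⟩)
        · exact ⟨i, le_rfl, h, rfl⟩
        · exact ⟨j, by omega, hj, rfl⟩
      · rintro ⟨j, hij, hj, rfl⟩
        by_cases hji : j = i
        · subst hji; exact Or.inl rfl
        · exact Or.inr ⟨j, by omega, hj, rfl⟩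
  | case2 i h =>
      simp only [List.not_mem_nil, false_iff]
      rintro ⟨j, hij, hj, rfl⟩
      omega

theorem mem_keys_pvPos (s : String) (k : String) :
    k ∈ (pvPos s).keys ↔ ∃ i, i < s.toList.length - 2 ∧ k = pvGramB s i := by
  unfold pvPos
  rw [PySem.Dict.keys_foldl_modify_key (List.range (s.toList.length - 2)) (pvGramB s) []
    (fun _ i v => v ++ [i]) PySem.Dict.empty]
  rw [PySem.Dict.keys_empty]
  constructor
  · intro h
    have := (PySem.List.mem_dedup _ _).mp h
    obtain ⟨i, hi, rfl⟩ := List.mem_map.mp this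
    exact ⟨i, List.mem_range.mp hi, rfl⟩
  · rintro ⟨i, hi, rfl⟩
    exact (PySem.List.mem_dedup _ _).mpr (List.mem_map.mpr ⟨i, List.mem_range.mpr hi, rfl⟩)

-- ---- B's occurrence lists are the filtered position range ----

theorem pvPos_getD (s : String) (c : String) :
    (pvPos s).getD c [] = (List.range (s.toList.length - 2)).filter (fun i => pvGramB s i == c) := by
  unfold pvPos
  have hmap : (List.range (s.toList.length - 2)).foldl
      (fun d i => d.modify (pvGramB s i) [] (fun v => v ++ [i])) PySem.Dict.empty
      = ((List.range (s.toList.length - 2)).map (fun i => (pvGramB s i, i))).foldl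
        (fun d p => d.modify p.1 [] (fun v => v ++ [p.2])) PySem.Dict.empty := by
    rw [List.foldl_map]
  rw [hmap, PySem.Dict.getD_foldl_modify_append, PySem.Dict.getD_empty, List.nil_append,
    List.filter_map, List.map_map]
  simp [Function.comp_def]

-- ---- per-pair value equality ----

theorem pvGramB_toList (s : String) (i : Nat) :
    (pvGramB s i).toList = PySem.List.slice s.toList (some (i : Int)) (some ((i : Int) + 3)) := by
  rw [pvGramB, PySem.Str.toList_slice]
  rfl

theorem pvF_eq (s : String) (ka kb : String) (i : Nat) :
    (pvGramB s i == ka || pvGramB s i == kb) = pvF s.toList ka.toList kb.toList i := by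
  have key : ∀ k : String, (pvGramB s i == k)
      = decide (PySem.List.slice s.toList (some (i : Int)) (some ((i : Int) + 3)) = k.toList) := by
    intro k
    rw [Bool.beq_eq_decide_eq]
    apply decide_eq_decide.mpr
    constructor
    · intro h; rw [← pvGramB_toList, h]
    · intro h; exact String.toList_inj.mp (by rw [pvGramB_toList]; exact h)
  rw [pvF, key ka, key kb]
  simp

theorem pvW_eq (s : String) (ka kb : String) :
    pvW s.toList.length (pvPos s) ka kb
      = pvScanA s.toList ka.toList kb.toList 0 (s.toList.length : Int) := by
  set n := s.toList.length with hn
  set m := n - 2 with hm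
  have hocc : (if kb = ka then (pvPos s).getD ka []
      else pvMerge ((pvPos s).getD ka []) ((pvPos s).getD kb []))
      = (List.range m).filter (fun i => pvGramB s i == ka || pvGramB s i == kb) := by
    by_cases hk : kb = ka
    · subst hk
      rw [if_pos rfl, pvPos_getD]
      apply List.filter_congr
      intro x _
      simp
    · rw [if_neg hk, pvPos_getD, pvPos_getD]
      exact pvMerge_filter _ _
        (fun x ⟨h1, h2⟩ => hk (by
          have e1 := eq_of_beq h1
          have e2 := eq_of_beq h2
          rw [← e1, ← e2]))
        (List.range m) List.pairwise_lt_range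
  rw [pvW, hocc, pvCount_eq_pick]
  have hfe : (List.range m).filter (fun i => pvGramB s i == ka || pvGramB s i == kb)
      = (List.range m).filter (pvF s.toList ka.toList kb.toList) := by
    apply List.filter_congr
    intro x _
    exact pvF_eq s ka kb x
  rw [hfe, pvPick_eq_scanC s.toList _ (n + 1) 0 (by omega), pvScanA_eq]

-- scan is symmetric in the two keys
theorem pvScanA_symm (cs : List Char) (k1 k2 : List Char) (m : Int) :
    pvScanA cs k1 k2 0 m = pvScanA cs k2 k1 0 m := by
  rw [pvScanA_eq, pvScanA_eq]
  have : pvF cs k1 k2 = pvF cs k2 k1 := by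
    funext i
    simp [pvF, or_comm]
  rw [this]

-- ===== VERDICT (by name: the statement is the Claim_ definition above) =====
theorem shortestLength_spec : Claim_equal_shortestLength := by
  intro original _dom
  unfold Spec_shortestLength shortestLength shortestLength_alt
  set cs := original.toList with hcs
  set n := cs.length with hn
  set KA := pvNextKey original 0 with hKA
  set pos := pvPos original with hpos
  rw [pv_nested_foldl KA KA (fun k1 k2 => pvScanA cs k1.toList k2.toList 0 (n : Int)) (n : Int),
    pvPairLoop_eq]
  apply pv_foldl_min_eq
  · -- every A-value is a B-value
    intro x hx
    obtain ⟨k1, hk1, hx⟩ := List.mem_flatMap.mp hx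
    obtain ⟨k2, hk2, rfl⟩ := List.mem_map.mp hx
    have hk1' : k1 ∈ pos.keys := by
      rw [hpos, mem_keys_pvPos]
      obtain ⟨j, _, hj, rfl⟩ := (mem_pvNextKey original k1 0).mp hk1
      exact ⟨j, by omega, rfl⟩
    have hk2' : k2 ∈ pos.keys := by
      rw [hpos, mem_keys_pvPos]
      obtain ⟨j, _, hj, rfl⟩ := (mem_pvNextKey original k2 0).mp hk2
      exact ⟨j, by omega, rfl⟩
    rcases pvVals_cover n pos pos.keys k1 k2 hk1' hk2' with h | h
    · exact ⟨pvW n pos k1 k2, h, le_of_eq (by rw [hpos, hn, hcs, pvW_eq])⟩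
    · exact ⟨pvW n pos k2 k1, h,
        le_of_eq (by rw [hpos, hn, hcs, pvW_eq, ← pvScanA_symm])⟩
  · -- every B-value is an A-value
    intro y hy
    obtain ⟨a, ha, b, hb, rfl⟩ := mem_pvVals n pos pos.keys y hy
    refine ⟨pvScanA cs a.toList b.toList 0 (n : Int), ?_, le_of_eq (by rw [hpos, hn, hcs, pvW_eq])⟩
    apply List.mem_flatMap.mpr
    have hmem : ∀ k : String, k ∈ pos.keys → k ∈ KA := by
      intro k hk
      rw [hpos, mem_keys_pvPos] at hk
      obtain ⟨i, hi, rfl⟩ := hk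
      exact (mem_pvNextKey original _ 0).mpr ⟨i, by omega, by omega, rfl⟩
    exact ⟨a, hmem a ha, List.mem_map.mpr ⟨b, hmem b hb, rfl⟩⟩
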